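-- pv_equiv track=rewrite | github.com/VishwajithS2005/Cryptography-Sem-6 | Week-2/Playfair Cipher/receiver.py | create_key_matrix
-- ===== SOURCE A (Python) =====
-- def create_key_matrix(key):
--     key = key.replace("j", "i")
--     key_matrix = []
--     used_chars = set()
--     row = 0
--     col = 0
--     temp = []
--     for char in key:
--         if char not in used_chars and char.isalpha():
--             used_chars.add(char)
--             temp.append(char)
--             col += 1
--             if col == 5:
--                 key_matrix.append(temp)
--                 temp = []
--                 row += 1
--                 col = 0
--     for i in range(ord('a'), ord('z') + 1):
--         char = chr(i)
--         if char == 'j':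
--             continue
--         if char not in used_chars:
--             used_chars.add(char)
--             temp.append(char)
--             col += 1
--             if col == 5:
--                 key_matrix.append(temp)
--                 temp = []
--                 row += 1
--                 col = 0
--     return key_matrix
-- ===== SOURCE B (Python) =====
-- def create_key_matrix(key):
--     key = key.replace("j", "i")
--     used = set()
--     seq = []
--     for char in key:
--         if char.isalpha() and char not in used:
--             used.add(char)
--             seq.append(char)
--     for i in range(ord('a'), ord('z') + 1):
--         char = chr(i)
--         if char != 'j' and char not in used:
--             used.add(char)
--             seq.append(char)
--     return [seq[i:i + 5] for i in range(0, len(seq) // 5 * 5, 5)]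
-- ===== Notes on version B (the rewrite author's own statement) =====
-- stated objective: simpler
-- what changed: A interleaves dedup-filtering with inline row/col chunk bookkeeping in both loops; B builds the flat deduplicated letter sequence in two plain filter passes and reshapes it into 5-wide rows (dropping any partial tail) in one separate slicing pass.
import Mathlib
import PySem

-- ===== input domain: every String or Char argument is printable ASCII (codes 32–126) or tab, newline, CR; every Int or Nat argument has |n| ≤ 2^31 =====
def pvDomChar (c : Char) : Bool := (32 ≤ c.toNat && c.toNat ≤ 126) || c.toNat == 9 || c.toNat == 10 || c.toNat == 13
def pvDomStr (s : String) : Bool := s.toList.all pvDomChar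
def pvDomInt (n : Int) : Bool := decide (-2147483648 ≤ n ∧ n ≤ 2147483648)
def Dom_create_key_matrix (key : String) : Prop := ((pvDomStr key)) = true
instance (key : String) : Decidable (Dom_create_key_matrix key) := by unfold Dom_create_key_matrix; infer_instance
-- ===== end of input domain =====

-- B builds the deduplicated letter sequence flat in two filter passes and reshapes it
-- into 5-wide rows in a separate slicing pass (objective: simpler decomposition, no
-- inline row/col chunk bookkeeping); same return value as A.

-- ===== PORT A =====
-- state: (key_matrix, used_chars, row, col, temp)
def pvAStep (st : List (List String) × PySem.Set String × Int × Int × List String)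
    (ch : String) : List (List String) × PySem.Set String × Int × Int × List String :=
  match st with
  | (km, used, row, col, temp) =>
    if !(PySem.Set.contains used ch) && PySem.Str.strIsalpha ch then
      let used := PySem.Set.add used ch
      let temp := temp ++ [ch]
      let col := col + 1
      if col == 5 then (km ++ [temp], used, row + 1, 0, ([] : List String))
      else (km, used, row, col, temp)
    else (km, used, row, col, temp)

def pvAStep2 (st : List (List String) × PySem.Set String × Int × Int × List String)
    (i : Int) : List (List String) × PySem.Set String × Int × Int × List String :=
  let ch := String.ofList [Char.ofNat i.toNat]  -- chr(i); exact for the range 97..122 used here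
  if ch == "j" then st
  else match st with
  | (km, used, row, col, temp) =>
    if !(PySem.Set.contains used ch) then
      let used := PySem.Set.add used ch
      let temp := temp ++ [ch]
      let col := col + 1
      if col == 5 then (km ++ [temp], used, row + 1, 0, ([] : List String))
      else (km, used, row, col, temp)
    else (km, used, row, col, temp)

def create_key_matrix (key : String) : List (List String) :=
  let key2 := PySem.Str.replace key "j" "i"
  let chs := key2.toList.map (fun c => String.ofList [c])  -- iterating a str yields 1-char strings
  let st1 := chs.foldl pvAStep (([] : List (List String)), PySem.Set.empty, 0, 0, ([] : List String))
  let st2 := (PySem.List.pyRange 97 123 1).foldl pvAStep2 st1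
  st2.1

-- ===== PORT B =====
-- state: (used, seq)
def pvBStep1 (st : PySem.Set String × List String) (ch : String) :
    PySem.Set String × List String :=
  if PySem.Str.strIsalpha ch && !(PySem.Set.contains st.1 ch) then
    (PySem.Set.add st.1 ch, st.2 ++ [ch])
  else st

def pvBStep2 (st : PySem.Set String × List String) (i : Int) :
    PySem.Set String × List String :=
  let ch := String.ofList [Char.ofNat i.toNat]  -- chr(i); exact for the range 97..122 used here
  if ch != "j" && !(PySem.Set.contains st.1 ch) then
    (PySem.Set.add st.1 ch, st.2 ++ [ch])
  else st

def create_key_matrix_alt (key : String) : List (List String) :=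
  let key2 := PySem.Str.replace key "j" "i"
  let chs := key2.toList.map (fun c => String.ofList [c])
  let p1 := chs.foldl pvBStep1 (PySem.Set.empty, ([] : List String))
  let seq := ((PySem.List.pyRange 97 123 1).foldl pvBStep2 p1).2
  (PySem.List.pyRange 0 (PySem.Int.floordiv (seq.length : Int) 5 * 5) 5).map
    (fun i => PySem.List.slice seq (some i) (some (i + 5)))

-- ===== PRECONDITION & SPEC =====
def Spec_create_key_matrix (key : String) (out : List (List String)) : Prop := out = create_key_matrix_alt key
instance (key : String) (out : List (List String)) : Decidable (Spec_create_key_matrix key out) := by unfold Spec_create_key_matrix; infer_instance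

-- ===== CLAIM (what is proved, stated in full; the proofs are below) =====
def Claim_equal_create_key_matrix : Prop := ∀ (key : String), Dom_create_key_matrix key → Spec_create_key_matrix key (create_key_matrix key)

-- ===== LEMMAS AND PROOFS =====

-- the on-the-fly 5-chunking A performs, isolated as a fold step
def pvChunkStep (st : List (List String) × List String) (ch : String) :
    List (List String) × List String :=
  if st.2.length + 1 = 5 then (st.1 ++ [st.2 ++ [ch]], []) else (st.1, st.2 ++ [ch])

-- greedy 5-chunking of a flat list, dropping the partial tail
def pvChunks5 (s : List String) : List (List String) :=
  if 5 ≤ s.length then s.take 5 :: pvChunks5 (s.drop 5) else []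
termination_by s.length
decreasing_by simp; omega

-- B's pass folds only extend the accumulator
lemma pvB1_acc (chs : List String) : ∀ (u : PySem.Set String) (acc : List String),
    chs.foldl pvBStep1 (u, acc)
      = ((chs.foldl pvBStep1 (u, [])).1, acc ++ (chs.foldl pvBStep1 (u, [])).2) := by
  induction chs with
  | nil => intro u acc; simp
  | cons c cs ih =>
    intro u acc
    simp only [List.foldl_cons, pvBStep1]
    by_cases h : (PySem.Str.strIsalpha c && !(PySem.Set.contains u c)) = true
    · simp only [h, if_pos, List.nil_append]
      rw [ih (PySem.Set.add u c) (acc ++ [c]), ih (PySem.Set.add u c) [c]]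
      simp
    · simp only [h]
      simp only [Bool.false_eq_true, if_false] at *
      exact ih u acc

lemma pvB2_acc (is : List Int) : ∀ (u : PySem.Set String) (acc : List String),
    is.foldl pvBStep2 (u, acc)
      = ((is.foldl pvBStep2 (u, [])).1, acc ++ (is.foldl pvBStep2 (u, [])).2) := by
  induction is with
  | nil => intro u acc; simp
  | cons i is ih =>
    intro u acc
    simp only [List.foldl_cons, pvBStep2]
    by_cases h : ((String.ofList [Char.ofNat i.toNat] != "j") && !(PySem.Set.contains u (String.ofList [Char.ofNat i.toNat]))) = true
    · simp only [h, if_pos, List.nil_append]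
      rw [ih (PySem.Set.add u (String.ofList [Char.ofNat i.toNat])) (acc ++ [String.ofList [Char.ofNat i.toNat]]),
          ih (PySem.Set.add u (String.ofList [Char.ofNat i.toNat])) [String.ofList [Char.ofNat i.toNat]]]
      simp
    · simp only [h]
      simp only [Bool.false_eq_true, if_false] at *
      exact ih u acc

-- A's pass 1 = B's pass 1 followed by chunking (row counter existential: A never reads it)
lemma pv_pass1 (chs : List String) :
    ∀ (km : List (List String)) (u : PySem.Set String) (row : Int) (t : List String),
    ∃ row' : Int,
      chs.foldl pvAStep (km, u, row, (t.length : Int), t)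
        = ((((chs.foldl pvBStep1 (u, [])).2).foldl pvChunkStep (km, t)).1,
           (chs.foldl pvBStep1 (u, [])).1,
           row',
           (((((chs.foldl pvBStep1 (u, [])).2).foldl pvChunkStep (km, t)).2).length : Int),
           (((chs.foldl pvBStep1 (u, [])).2).foldl pvChunkStep (km, t)).2) := by
  induction chs with
  | nil => intro km u row t; exact ⟨row, by simp⟩
  | cons c cs ih =>
    intro km u row t
    simp only [List.foldl_cons, pvAStep, pvBStep1]
    by_cases ha : PySem.Str.strIsalpha c = true
    · by_cases hm : PySem.Set.contains u c = true
      · simp only [ha, hm, Bool.not_true, Bool.false_and, Bool.and_false,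
          Bool.false_eq_true, if_false]
        exact ih km u row t
      · simp only [ha, hm, Bool.not_false, Bool.and_true, if_pos, List.nil_append]
        rw [pvB1_acc cs (PySem.Set.add u c) [c]]
        by_cases h5 : t.length = 4
        · have hc : ((t.length : Int) + 1 == 5) = true := by simp [h5]
          simp only [hc, if_pos]
          have hps : pvChunkStep (km, t) c = (km ++ [t ++ [c]], []) := by
            simp [pvChunkStep, h5]
          rw [List.singleton_append, List.foldl_cons, hps]
          have := ih (km ++ [t ++ [c]]) (PySem.Set.add u c) (row + 1) []
          simpa using this
        · have hc : ((t.length : Int) + 1 == 5) = false := by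
            simp; omega
          simp only [hc, Bool.false_eq_true, if_false]
          have hps : pvChunkStep (km, t) c = (km, t ++ [c]) := by
            simp only [pvChunkStep, if_neg (show ¬(t.length + 1 = 5) by omega)]
          rw [List.singleton_append, List.foldl_cons, hps]
          have hlen : ((t.length : Int) + 1) = (((t ++ [c]).length : Int)) := by simp
          rw [hlen]
          exact ih km (PySem.Set.add u c) row (t ++ [c])
    · simp only [ha, Bool.and_false, Bool.false_and, Bool.false_eq_true, if_false]
      exact ih km u row t

-- A's pass 2 = B's pass 2 followed by chunking
lemma pv_pass2 (is : List Int) :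
    ∀ (km : List (List String)) (u : PySem.Set String) (row : Int) (t : List String),
    ∃ row' : Int,
      is.foldl pvAStep2 (km, u, row, (t.length : Int), t)
        = ((((is.foldl pvBStep2 (u, [])).2).foldl pvChunkStep (km, t)).1,
           (is.foldl pvBStep2 (u, [])).1,
           row',
           (((((is.foldl pvBStep2 (u, [])).2).foldl pvChunkStep (km, t)).2).length : Int),
           (((is.foldl pvBStep2 (u, [])).2).foldl pvChunkStep (km, t)).2) := by
  induction is with
  | nil => intro km u row t; exact ⟨row, by simp⟩
  | cons i is ih =>
    intro km u row t
    simp only [List.foldl_cons, pvAStep2, pvBStep2]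
    by_cases hj : (String.ofList [Char.ofNat i.toNat] == "j") = true
    · simp only [hj, if_pos]
      have : (String.ofList [Char.ofNat i.toNat] != "j") = false := by
        simp_all
      simp only [this, Bool.false_and, Bool.false_eq_true, if_false]
      exact ih km u row t
    · simp only [hj, Bool.false_eq_true, if_false]
      have hne : (String.ofList [Char.ofNat i.toNat] != "j") = true := by
        simp_all
      simp only [hne, Bool.true_and]
      by_cases hm : PySem.Set.contains u (String.ofList [Char.ofNat i.toNat]) = true
      · simp only [hm, Bool.not_true, Bool.false_eq_true, if_false]
        exact ih km u row t
      · have hm' : (!PySem.Set.contains u (String.ofList [Char.ofNat i.toNat])) = true := by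
          simp_all
        simp only [hm', if_pos, List.nil_append]
        rw [pvB2_acc is (PySem.Set.add u (String.ofList [Char.ofNat i.toNat])) [String.ofList [Char.ofNat i.toNat]]]
        set c := String.ofList [Char.ofNat i.toNat] with hcdef
        by_cases h5 : t.length = 4
        · have hc : ((t.length : Int) + 1 == 5) = true := by simp [h5]
          simp only [hc, if_pos]
          have hps : pvChunkStep (km, t) c = (km ++ [t ++ [c]], []) := by
            simp [pvChunkStep, h5]
          rw [List.singleton_append, List.foldl_cons, hps]
          have := ih (km ++ [t ++ [c]]) (PySem.Set.add u c) (row + 1) []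
          simpa using this
        · have hc : ((t.length : Int) + 1 == 5) = false := by
            simp; omega
          simp only [hc, Bool.false_eq_true, if_false]
          have hps : pvChunkStep (km, t) c = (km, t ++ [c]) := by
            simp only [pvChunkStep, if_neg (show ¬(t.length + 1 = 5) by omega)]
          rw [List.singleton_append, List.foldl_cons, hps]
          have hlen : ((t.length : Int) + 1) = (((t ++ [c]).length : Int)) := by simp
          rw [hlen]
          exact ih km (PySem.Set.add u c) row (t ++ [c])

-- the chunk fold computes greedy 5-chunks
lemma pv_chunkfold (s : List String) :
    ∀ (km : List (List String)) (t : List String), t.length < 5 →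
      (s.foldl pvChunkStep (km, t)).1 = km ++ pvChunks5 (t ++ s) := by
  induction s with
  | nil =>
    intro km t ht
    simp only [List.append_nil, List.foldl_nil]
    rw [pvChunks5, if_neg (by omega)]
    simp
  | cons c s ih =>
    intro km t ht
    rw [List.foldl_cons]
    by_cases h5 : t.length = 4
    · have hps : pvChunkStep (km, t) c = (km ++ [t ++ [c]], []) := by
        simp [pvChunkStep, h5]
      have hlen : 5 ≤ (t ++ c :: s).length := by simp; omega
      have htake : (t ++ c :: s).take 5 = t ++ [c] := by
        rw [show t ++ c :: s = (t ++ [c]) ++ s by simp]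
        exact List.take_left' (by simp [h5])
      have hdrop : (t ++ c :: s).drop 5 = s := by
        rw [show t ++ c :: s = (t ++ [c]) ++ s by simp]
        exact List.drop_left' (by simp [h5])
      have hrw : pvChunks5 (t ++ c :: s) = (t ++ [c]) :: pvChunks5 s := by
        rw [pvChunks5, if_pos hlen, htake, hdrop]
      rw [hps, ih _ [] (by simp), hrw]
      simp
    · have hps : pvChunkStep (km, t) c = (km, t ++ [c]) := by
        simp only [pvChunkStep, if_neg (show ¬(t.length + 1 = 5) by omega)]
      rw [hps, ih km (t ++ [c]) (by simp; omega)]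
      simp

-- greedy chunking as an index map
lemma pv_chunks5_map (s : List String) :
    pvChunks5 s = (List.range (s.length / 5)).map (fun j => (s.drop (5 * j)).take 5) := by
  induction s using pvChunks5.induct with
  | case1 s h ih =>
    rw [pvChunks5, if_pos h, ih]
    have hq : s.length / 5 = (s.drop 5).length / 5 + 1 := by
      simp; omega
    rw [hq, List.range_succ_eq_map]
    simp only [List.map_cons, List.map_map]
    refine congrArg₂ _ (by simp) ?_
    apply List.map_congr_left
    intro a ha
    simp only [Function.comp_apply, List.drop_drop]
    congr 2
    omega
  | case2 s h =>
    rw [pvChunks5, if_neg h]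
    have : s.length / 5 = 0 := by omega
    simp [this]

-- B's slicing reshape is greedy chunking
lemma pv_reshape (seq : List String) :
    (PySem.List.pyRange 0 (PySem.Int.floordiv (seq.length : Int) 5 * 5) 5).map
      (fun i => PySem.List.slice seq (some i) (some (i + 5))) = pvChunks5 seq := by
  rw [pv_chunks5_map]
  have hfd : PySem.Int.floordiv (seq.length : Int) 5 * 5 = ((seq.length / 5 * 5 : Nat) : Int) := by
    rw [PySem.Int.floordiv_eq_ediv_of_pos (by norm_num)]
    omega
  rw [hfd, PySem.List.pyRange_of_pos 0 _ (by norm_num)]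
  have hcount : (if (0 : Int) < ((seq.length / 5 * 5 : Nat) : Int)
      then ((((seq.length / 5 * 5 : Nat) : Int) - 0 + 5 - 1) / 5).toNat else 0)
      = seq.length / 5 := by
    split_ifs with h <;> omega
  rw [hcount, List.map_map]
  apply List.map_congr_left
  intro j hj
  simp only [Function.comp_apply, zero_add]
  rw [show (5 * (j : Int)) = (((5 * j : Nat)) : Int) by push_cast; ring,
      show (((5 * j : Nat)) : Int) + 5 = (((5 * j + 5 : Nat)) : Int) by push_cast; ring,
      PySem.List.slice_natCast]
  congr 1
  omega

-- ===== VERDICT (by name: the statement is the Claim_ definition above) =====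
theorem create_key_matrix_spec : Claim_equal_create_key_matrix := by
  intro key _
  show create_key_matrix key = create_key_matrix_alt key
  unfold create_key_matrix create_key_matrix_alt
  dsimp only
  set chs := (PySem.Str.replace key "j" "i").toList.map (fun c => String.ofList [c]) with hchs
  set rng := PySem.List.pyRange 97 123 1 with hrng
  set p1 := chs.foldl pvBStep1 (PySem.Set.empty, ([] : List String)) with hp1
  set p2 := rng.foldl pvBStep2 (p1.1, ([] : List String)) with hp2
  obtain ⟨r1, h1⟩ := pv_pass1 chs [] PySem.Set.empty 0 []
  simp only [List.length_nil, Nat.cast_zero] at h1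
  set c1 := (p1.2).foldl pvChunkStep (([] : List (List String)), ([] : List String)) with hc1
  obtain ⟨r2, h2⟩ := pv_pass2 rng c1.1 p1.1 r1 c1.2
  rw [h1, h2]
  have hseq : (rng.foldl pvBStep2 p1).2 = p1.2 ++ p2.2 := by
    rw [show p1 = (p1.1, p1.2) from rfl, pvB2_acc rng p1.1 p1.2]
  have hA : ((p2.2).foldl pvChunkStep (c1.1, c1.2)).1
      = pvChunks5 (p1.2 ++ p2.2) := by
    have hsplit : (p1.2 ++ p2.2).foldl pvChunkStep (([] : List (List String)), ([] : List String))
        = (p2.2).foldl pvChunkStep c1 := by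
      rw [List.foldl_append, hc1]
    calc ((p2.2).foldl pvChunkStep (c1.1, c1.2)).1
        = ((p1.2 ++ p2.2).foldl pvChunkStep (([] : List (List String)), ([] : List String))).1 := by
          rw [hsplit]
      _ = [] ++ pvChunks5 ([] ++ (p1.2 ++ p2.2)) := pv_chunkfold _ _ _ (by simp)
      _ = pvChunks5 (p1.2 ++ p2.2) := by simp
  rw [hseq, hA, pv_reshape]
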